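-- pv_equiv track=rewrite | github.com/safecorners/algorithms-with-python | src/baekjoon/baekjoon_2143.py | compute
-- ===== SOURCE A (Python) =====
-- def compute(
--     t: int,
--     n: int,
--     a: list[int],
--     m: int,
--     b: list[int],
-- ) -> int:
--     a = [0] + a
--     b = [0] + b
--
--     prefix = {
--         "a": [0] * len(a),
--         "b": [0] * len(b),
--     }
--
--     for i in range(1, len(a)):
--         prefix["a"][i] = a[i] + prefix["a"][i - 1]
--
--     for i in range(1, len(b)):
--         prefix["b"][i] = b[i] + prefix["b"][i - 1]
--
--     set_a: dict[int, int] = {}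
--     set_b: dict[int, int] = {}
--
--     # o(n^2)
--
--     for k in range(1, len(a) - 1):
--         for i in range(k, len(a)):
--             v = prefix["a"][i] - prefix["a"][i - k]
--             if v in set_a:
--                 set_a[v] += 1
--             else:
--                 set_a[v] = 1
--
--     v = prefix["a"][len(a) - 1]
--     if v in set_a:
--         set_a[v] += 1
--     else:
--         set_a[v] = 1
--
--     # o(m^2)
--     for k in range(1, len(b) - 1):
--         for i in range(k, len(b)):
--             v = prefix["b"][i] - prefix["b"][i - k]
--             if v in set_b:
--                 set_b[v] += 1
--             else:
--                 set_b[v] = 1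
--
--     v = prefix["b"][len(b) - 1]
--     if v in set_b:
--         set_b[v] += 1
--     else:
--         set_b[v] = 1
--
--     count = 0
--
--     for v in set_a:
--         if t - v in set_b:
--             count += set_a[v] * set_b[t - v]
--
--     return count
-- ===== SOURCE B (Python) =====
-- def _subsums(arr):
--     """Frequency map of the sums of all nonempty contiguous subarrays,
--     by running accumulation from each start index (no prefix table)."""
--     counts = {}
--     for i in range(len(arr)):
--         s = 0
--         for x in arr[i:]:
--             s += x
--             counts[s] = counts.get(s, 0) + 1
--     return counts
--
--
-- def compute(t, n, a, m, b):
--     ca = _subsums(a)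
--     cb = _subsums(b)
--     return sum(c * cb.get(t - v, 0) for v, c in ca.items())
-- ===== Notes on version B (the rewrite author's own statement) =====
-- stated objective: simpler
-- what changed: B drops A's prefix-sum table, the length-outer double loop and the special-cased full-length term: it accumulates each array's subarray sums directly (running sum from each start index) into one frequency dict and pairs the two dicts with a plain get-with-default sum.
-- intended difference: When a or b is empty, A's special-cased full-length branch counts a phantom empty-subarray sum of 0 for the empty array (e.g. A returns 1 on t=0,a=[],b=[]), while B counts only nonempty subarrays and returns the count without that phantom pair, which is the intended meaning of a subarray-pair count. — e.g. on compute(0, 0, [], 0, []): A returns 1, B returns 0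
import Mathlib
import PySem

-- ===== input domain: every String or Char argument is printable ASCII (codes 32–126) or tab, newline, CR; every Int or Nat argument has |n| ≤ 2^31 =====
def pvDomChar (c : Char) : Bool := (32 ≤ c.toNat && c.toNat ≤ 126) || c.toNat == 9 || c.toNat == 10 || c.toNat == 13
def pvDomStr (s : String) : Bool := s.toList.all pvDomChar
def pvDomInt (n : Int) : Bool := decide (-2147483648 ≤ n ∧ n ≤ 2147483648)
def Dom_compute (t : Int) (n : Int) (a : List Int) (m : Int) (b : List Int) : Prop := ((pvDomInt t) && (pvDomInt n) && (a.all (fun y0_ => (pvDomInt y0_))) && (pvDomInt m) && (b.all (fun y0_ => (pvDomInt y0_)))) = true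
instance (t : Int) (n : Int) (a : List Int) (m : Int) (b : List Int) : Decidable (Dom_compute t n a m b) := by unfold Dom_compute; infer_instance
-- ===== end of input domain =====

-- B replaces A's prefix-sum table, length-outer double loop and special-cased full-length
-- term by direct running-sum accumulation of each array's subarray sums (objective: simpler).

-- ===== PORT A =====
-- The Python runs the identical prefix/dict-building passage once for the 0-prepended a
-- and once for the 0-prepended b; those passages are the helpers below, transliterated.

-- prefix["a"] build: for i in range(1, len(x)): prefix[i] = x[i] + prefix[i-1]
-- (each i from pyRange 1 len is ≥ 1, so `i.toNat` is exact for the list write)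
def prefListA (x : List Int) : List Int :=
  (PySem.List.pyRange 1 (x.length : Int)).foldl
    (fun p i => p.set i.toNat (PySem.List.pyGetD x i 0 + PySem.List.pyGetD p (i - 1) 0))
    (List.replicate x.length 0)

-- if v in d: d[v] += 1 else: d[v] = 1
def bumpA (d : PySem.Dict Int Int) (v : Int) : PySem.Dict Int Int :=
  if d.contains v then d.insert v (d.getD v 0 + 1) else d.insert v 1

-- the k/i double loop over prefix differences, then the special-cased full-length sum
def subCountsA (x : List Int) : PySem.Dict Int Int :=
  let pre := prefListA x
  let d := (PySem.List.pyRange 1 ((x.length : Int) - 1)).foldl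
    (fun d k =>
      (PySem.List.pyRange k (x.length : Int)).foldl
        (fun d i => bumpA d (PySem.List.pyGetD pre i 0 - PySem.List.pyGetD pre (i - k) 0)) d)
    PySem.Dict.empty
  bumpA d (PySem.List.pyGetD pre ((x.length : Int) - 1) 0)

def compute (t : Int) (n : Int) (a : List Int) (m : Int) (b : List Int) : Int :=
  let set_a := subCountsA (0 :: a)
  let set_b := subCountsA (0 :: b)
  set_a.keys.foldl
    (fun count v =>
      if set_b.contains (t - v) then count + set_a.getD v 0 * set_b.getD (t - v) 0 else count) 0

-- ===== PORT B =====
-- _subsums: for i in range(len(arr)): s = 0; for x in arr[i:]: s += x; counts[s] += 1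
def subsumsB (arr : List Int) : PySem.Dict Int Int :=
  (List.range arr.length).foldl
    (fun counts (i : Nat) =>
      ((PySem.List.slice arr (some (i : Int))).foldl
        (fun (p : Int × PySem.Dict Int Int) x =>
          let s := p.1 + x
          (s, p.2.insert s (p.2.getD s 0 + 1)))
        ((0 : Int), counts)).2)
    PySem.Dict.empty

def compute_alt (t : Int) (n : Int) (a : List Int) (m : Int) (b : List Int) : Int :=
  let ca := subsumsB a
  let cb := subsumsB b
  ca.items.foldl (fun acc p => acc + p.2 * cb.getD (t - p.1) 0) 0

-- ===== PRECONDITION & SPEC =====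
-- When a or b is empty, A's special-cased full-length branch counts a phantom empty-subarray
-- sum of 0 for the empty array, so A returns one extra pair whenever t is a contiguous-subarray
-- sum of the other array (or t = 0 with both empty), while B counts only nonempty subarrays;
-- B's count without the phantom pair is the intended value.  (One of a, b being empty, the
-- other array is a ++ b.)
def D_compute (t : Int) (n : Int) (a : List Int) (m : Int) (b : List Int) : Prop :=
  (a = [] ∨ b = []) ∧ (a = b ∧ t = 0 ∨
    ∃ j ∈ List.range ((a ++ b).length + 1), ∃ i ∈ List.range j, (((a ++ b).take j).drop i).sum = t)
instance (t : Int) (n : Int) (a : List Int) (m : Int) (b : List Int) : Decidable (D_compute t n a m b) := by unfold D_compute; infer_instance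

def Spec_compute (t : Int) (n : Int) (a : List Int) (m : Int) (b : List Int) (out : Int) : Prop := ¬ D_compute t n a m b → out = compute_alt t n a m b
instance (t : Int) (n : Int) (a : List Int) (m : Int) (b : List Int) (out : Int) : Decidable (Spec_compute t n a m b out) := by unfold Spec_compute; infer_instance

def pvDiffWitness_compute : Int × Int × List Int × Int × List Int := (0, 0, [], 0, [])
def pvDiffWitnessOut_compute : Int × Int := (1, 0)

-- ===== CLAIM (what is proved, stated in full; the proofs are below) =====
def Claim_unchanged_compute : Prop := ∀ (t : Int) (n : Int) (a : List Int) (m : Int) (b : List Int), Dom_compute t n a m b → Spec_compute t n a m b (compute t n a m b)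
def Claim_changed_compute : Prop := Dom_compute (pvDiffWitness_compute.1) (pvDiffWitness_compute.2.1) (pvDiffWitness_compute.2.2.1) (pvDiffWitness_compute.2.2.2.1) (pvDiffWitness_compute.2.2.2.2) ∧ D_compute (pvDiffWitness_compute.1) (pvDiffWitness_compute.2.1) (pvDiffWitness_compute.2.2.1) (pvDiffWitness_compute.2.2.2.1) (pvDiffWitness_compute.2.2.2.2) ∧ compute (pvDiffWitness_compute.1) (pvDiffWitness_compute.2.1) (pvDiffWitness_compute.2.2.1) (pvDiffWitness_compute.2.2.2.1) (pvDiffWitness_compute.2.2.2.2) = pvDiffWitnessOut_compute.1 ∧ compute_alt (pvDiffWitness_compute.1) (pvDiffWitness_compute.2.1) (pvDiffWitness_compute.2.2.1) (pvDiffWitness_compute.2.2.2.1) (pvDiffWitness_compute.2.2.2.2) = pvDiffWitnessOut_compute.2 ∧ pvDiffWitnessOut_compute.1 ≠ pvDiffWitnessOut_compute.2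
def Claim_exact_compute : Prop := ∀ (t : Int) (n : Int) (a : List Int) (m : Int) (b : List Int), Dom_compute t n a m b → D_compute t n a m b → compute t n a m b ≠ compute_alt t n a m b

-- ===== LEMMAS AND PROOFS =====
-- ===== proof-layer definitions =====
def pvS (x : List Int) (i : Nat) : Int := (x.take i).sum

def pvEnumA (N : Nat) : List (Nat × Nat) :=
  (List.range (N - 1)).flatMap (fun k' => (List.range (N - k')).map (fun j => (j, 1 + k' + j))) ++ [(0, N)]

def pvEnumB (N : Nat) : List (Nat × Nat) :=
  (List.range N).flatMap (fun i => (List.range (N - i)).map (fun l' => (i, i + l' + 1)))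

def pvLA (x : List Int) : List Int := (pvEnumA x.length).map (fun p => pvS x p.2 - pvS x p.1)
def pvLB (x : List Int) : List Int := (pvEnumB x.length).map (fun p => pvS x p.2 - pvS x p.1)

lemma pvS_succ (x : List Int) (j : Nat) (h : j < x.length) :
    pvS x (j + 1) = pvS x j + x.getD j 0 := by
  rw [pvS, pvS, List.take_add_one, List.sum_append, List.getD_eq_getElem?_getD,
    List.getElem?_eq_getElem h]
  simp

lemma pyRange_nat (u v : Nat) :
    PySem.List.pyRange (u : Int) (v : Int) = (List.range (v - u)).map (fun k => ((u + k : Nat) : Int)) := by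
  rw [PySem.List.pyRange_of_pos _ _ (by norm_num : (0:Int) < 1)]
  split_ifs with h
  · have h' : u < v := by exact_mod_cast h
    have : (((v:Int) - u + 1 - 1) / 1).toNat = v - u := by omega
    rw [this]
    exact List.map_congr_left (fun k _ => by push_cast; ring)
  · have h' : v ≤ u := by omega
    have : v - u = 0 := by omega
    simp [this]

lemma prefAux (x : List Int) (j : Nat) (hj : j ≤ x.length) :
    (List.range j).foldl
      (fun (p : List Int) (k : Nat) => p.set ((1 + (k : Int)).toNat)
        (PySem.List.pyGetD (0 :: x) (1 + (k : Int)) 0 +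
          PySem.List.pyGetD p (1 + (k : Int) - 1) 0))
      (List.replicate (x.length + 1) 0)
    = (List.range (x.length + 1)).map (fun i => if i ≤ j then pvS x i else 0) := by
  induction j with
  | zero =>
    apply List.ext_getElem
    · simp
    · intro i h1 h2
      simp at h2
      simp [List.getElem_replicate]
      intro hi
      subst hi
      simp [pvS]
  | succ j ih =>
    rw [List.range_succ, List.foldl_append]
    rw [ih (by omega)]
    simp only [List.foldl_cons, List.foldl_nil]
    have e0 : (1 + (j : Int)) = ((1 + j : Nat) : Int) := by omega
    have e1 : (1 + (j : Int)).toNat = 1 + j := by omega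
    have e2 : PySem.List.pyGetD (0 :: x) (1 + (j : Int)) 0 = x.getD j 0 := by
      rw [e0, PySem.List.pyGetD_natCast]
      show (0 :: x).getD (1 + j) 0 = _
      rw [Nat.add_comm 1 j, List.getD_cons_succ]
    have e3 : (1 + (j : Int)) - 1 = ((j : Nat) : Int) := by ring
    rw [e1, e2, e3, PySem.List.pyGetD_natCast]
    rw [PySem.List.getD_map_range (fun i => if i ≤ j then pvS x i else 0) (x.length + 1) j 0 (by omega)]
    rw [if_pos (le_refl j)]
    apply List.ext_getElem
    · simp
    · intro i h1 h2
      simp only [List.length_map, List.length_range] at h2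
      rw [List.getElem_set, List.getElem_map, List.getElem_range, List.getElem_map,
        List.getElem_range]
      by_cases hij : 1 + j = i
      · subst hij
        rw [if_pos rfl, if_pos (by omega)]
        rw [Nat.add_comm 1 j, pvS_succ x j (by omega)]
        ring
      · rw [if_neg hij]
        by_cases hle : i ≤ j
        · rw [if_pos hle, if_pos (by omega)]
        · rw [if_neg hle, if_neg (by omega)]

lemma prefChar (x : List Int) :
    prefListA (0 :: x) = (List.range (x.length + 1)).map (fun i => pvS x i) := by
  unfold prefListA
  have hr := pyRange_nat 1 (x.length + 1)
  simp only [Nat.cast_one, Nat.add_sub_cancel] at hr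
  push_cast at hr
  rw [List.length_cons]
  push_cast
  rw [hr, List.foldl_map, prefAux x x.length (le_refl _)]
  apply List.map_congr_left
  intro i hi
  simp at hi
  rw [if_pos (by omega)]

lemma bumpA_eq (d : PySem.Dict Int Int) (v : Int) :
    bumpA d v = d.insert v (d.getD v 0 + 1) := by
  unfold bumpA
  cases h : d.contains v
  · rw [if_neg (by simp), PySem.Dict.getD_of_not_contains d 0 h]
    norm_num
  · rw [if_pos rfl]

lemma foldl_flatMap_fold {α β γ : Type} (L : List α) (g : α → List β) (f : γ → β → γ) (init : γ) :
    (L.flatMap g).foldl f init = L.foldl (fun acc x => (g x).foldl f acc) init := by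
  rw [List.flatMap_def, List.foldl_flatten, List.foldl_map]

lemma subA_char (x : List Int) :
    subCountsA (0 :: x) =
      (pvLA x).foldl (fun d v => d.insert v (d.getD v 0 + 1)) PySem.Dict.empty := by
  unfold subCountsA
  dsimp only
  rw [prefChar x]
  have hN : (((0 :: x).length : Nat) : Int) = (x.length : Int) + 1 := by simp
  rw [hN]
  set N := x.length with hNdef
  have hr1 : PySem.List.pyRange 1 ((N : Int) + 1 - 1) =
      (List.range (N - 1)).map (fun (k' : Nat) => (1 + (k' : Int))) := by
    have h := pyRange_nat 1 N
    simp only [Nat.cast_one] at h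
    have e : (N : Int) + 1 - 1 = (N : Int) := by ring
    rw [e, h]
    exact List.map_congr_left (fun k _ => by push_cast; ring)
  rw [hr1, List.foldl_map]
  have houter : ∀ (d : PySem.Dict Int Int), ∀ k' ∈ List.range (N - 1),
      (PySem.List.pyRange (1 + (k' : Int)) ((N : Int) + 1)).foldl
        (fun d i => bumpA d
          (PySem.List.pyGetD ((List.range (N + 1)).map (fun i => pvS x i)) i 0 -
            PySem.List.pyGetD ((List.range (N + 1)).map (fun i => pvS x i)) (i - (1 + (k' : Int))) 0)) d
      = ((List.range (N - k')).map (fun (j : Nat) => pvS x (1 + k' + j) - pvS x j)).foldl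
          (fun d v => d.insert v (d.getD v 0 + 1)) d := by
    intro d k' hk'
    have hr2 : PySem.List.pyRange (1 + (k' : Int)) ((N : Int) + 1) =
        (List.range (N - k')).map (fun (j : Nat) => ((1 + k' + j : Nat) : Int)) := by
      have h := pyRange_nat (1 + k') (N + 1)
      have e1 : ((1 + k' : Nat) : Int) = 1 + (k' : Int) := by push_cast; ring
      have e2 : ((N + 1 : Nat) : Int) = (N : Int) + 1 := by push_cast; ring
      have e3 : N + 1 - (1 + k') = N - k' := by omega
      rw [e1, e2, e3] at h
      exact h
    rw [hr2, List.foldl_map, List.foldl_map]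
    apply PySem.List.foldl_congr_mem
    intro acc j hj
    simp only [List.mem_range] at hj hk'
    have hb1 : 1 + k' + j < N + 1 := by omega
    have hb2 : j < N + 1 := by omega
    have e4 : ((1 + k' + j : Nat) : Int) - (1 + (k' : Int)) = ((j : Nat) : Int) := by push_cast; ring
    rw [e4, PySem.List.pyGetD_natCast, PySem.List.pyGetD_natCast,
      PySem.List.getD_map_range _ _ _ _ hb1, PySem.List.getD_map_range _ _ _ _ hb2, bumpA_eq]
  rw [PySem.List.foldl_congr_mem _ _ _ _ houter]
  rw [← foldl_flatMap_fold (List.range (N - 1))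
    (fun (k' : Nat) => (List.range (N - k')).map (fun (j : Nat) => pvS x (1 + k' + j) - pvS x j))
    (fun (d : PySem.Dict Int Int) (v : Int) => d.insert v (d.getD v 0 + 1)) PySem.Dict.empty]
  have hlast : PySem.List.pyGetD ((List.range (N + 1)).map (fun i => pvS x i)) ((N : Int) + 1 - 1) 0
      = pvS x N := by
    have e : (N : Int) + 1 - 1 = ((N : Nat) : Int) := by ring
    rw [e, PySem.List.pyGetD_natCast, PySem.List.getD_map_range _ _ _ _ (by omega)]
  rw [hlast, bumpA_eq]
  rw [← List.foldl_concat (fun (d : PySem.Dict Int Int) (v : Int) => d.insert v (d.getD v 0 + 1))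
    PySem.Dict.empty (pvS x N)
    ((List.range (N - 1)).flatMap
      (fun (k' : Nat) => (List.range (N - k')).map (fun (j : Nat) => pvS x (1 + k' + j) - pvS x j)))]
  congr 1
  simp [pvLA, pvEnumA, List.map_flatMap, List.map_map, Function.comp_def, pvS, hNdef, List.take_length]

def pvSumsFrom (s : Int) : List Int → List Int
  | [] => []
  | x :: xs => (s + x) :: pvSumsFrom (s + x) xs

lemma pvSumsFrom_spec (l : List Int) : ∀ s : Int,
    pvSumsFrom s l = (List.range l.length).map (fun j => s + (l.take (j + 1)).sum) := by
  induction l with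
  | nil => intro s; simp [pvSumsFrom]
  | cons y ys ih =>
    intro s
    rw [pvSumsFrom, ih (s + y)]
    simp only [List.length_cons, List.range_succ_eq_map, List.map_cons, List.map_map]
    congr 1
    · simp
    · apply List.map_congr_left
      intro j _
      simp only [Function.comp_def, Nat.succ_eq_add_one]
      rw [List.take_succ_cons]
      simp only [List.sum_cons]
      ring
lemma innerB_fold (l : List Int) : ∀ (s : Int) (d : PySem.Dict Int Int),
    (l.foldl (fun (p : Int × PySem.Dict Int Int) x =>
        let s' := p.1 + x
        (s', p.2.insert s' (p.2.getD s' 0 + 1))) (s, d)).2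
      = (pvSumsFrom s l).foldl (fun d v => d.insert v (d.getD v 0 + 1)) d := by
  induction l with
  | nil => intro s d; simp [pvSumsFrom]
  | cons y ys ih =>
    intro s d
    rw [List.foldl_cons, pvSumsFrom, List.foldl_cons]
    exact ih (s + y) _

lemma sum_take_drop (x : List Int) (i j : Nat) :
    ((x.drop i).take j).sum = pvS x (i + j) - pvS x i := by
  have h : x.take (i + j) = x.take i ++ (x.drop i).take j := List.take_add
  have h2 := congrArg List.sum h
  rw [List.sum_append] at h2
  simp only [pvS]
  omega

lemma subB_char (x : List Int) :
    subsumsB x = (pvLB x).foldl (fun d v => d.insert v (d.getD v 0 + 1)) PySem.Dict.empty := by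
  unfold subsumsB
  have hcong : ∀ (d : PySem.Dict Int Int), ∀ i ∈ List.range x.length,
      ((PySem.List.slice x (some ((i : Nat) : Int))).foldl
        (fun (p : Int × PySem.Dict Int Int) y =>
          let s := p.1 + y
          (s, p.2.insert s (p.2.getD s 0 + 1))) ((0 : Int), d)).2
      = ((List.range (x.length - i)).map (fun (l' : Nat) => pvS x (i + l' + 1) - pvS x i)).foldl
          (fun d v => d.insert v (d.getD v 0 + 1)) d := by
    intro d i hi
    rw [PySem.List.slice_from x (by positivity), Int.toNat_natCast, innerB_fold,
      pvSumsFrom_spec, List.length_drop]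
    congr 1
    apply List.map_congr_left
    intro l' hl'
    rw [sum_take_drop x i (l' + 1)]
    have h3 : i + (l' + 1) = i + l' + 1 := by omega
    rw [h3]
    ring
  rw [PySem.List.foldl_congr_mem _ _ _ _ hcong]
  rw [← foldl_flatMap_fold (List.range x.length)
    (fun (i : Nat) => (List.range (x.length - i)).map (fun (l' : Nat) => pvS x (i + l' + 1) - pvS x i))
    (fun (d : PySem.Dict Int Int) (v : Int) => d.insert v (d.getD v 0 + 1)) PySem.Dict.empty]
  congr 1
  simp [pvLB, pvEnumB, List.map_flatMap, List.map_map, Function.comp_def]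

lemma mem_enumB (N : Nat) (p : Nat × Nat) :
    p ∈ pvEnumB N ↔ p.1 < p.2 ∧ p.2 ≤ N := by
  simp only [pvEnumB, List.mem_flatMap, List.mem_map, List.mem_range]
  constructor
  · rintro ⟨i, hi, l', hl', rfl⟩
    simp
    omega
  · rintro ⟨h1, h2⟩
    exact ⟨p.1, by omega, p.2 - p.1 - 1, by omega, by obtain ⟨u, v⟩ := p; simp at h1 h2 ⊢; omega⟩

lemma mem_enumA (N : Nat) (hN : 1 ≤ N) (p : Nat × Nat) :
    p ∈ pvEnumA N ↔ p.1 < p.2 ∧ p.2 ≤ N := by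
  simp only [pvEnumA, List.mem_append, List.mem_flatMap, List.mem_map, List.mem_range,
    List.mem_singleton]
  constructor
  · rintro (⟨k', hk', j, hj, rfl⟩ | rfl)
    · simp; omega
    · simp; omega
  · rintro ⟨h1, h2⟩
    by_cases hc : p.2 - p.1 < N
    · left
      exact ⟨p.2 - p.1 - 1, by omega, p.1, by omega, by obtain ⟨u, v⟩ := p; simp at h1 h2 hc ⊢; omega⟩
    · right
      obtain ⟨u, v⟩ := p
      simp at h1 h2 hc ⊢
      omega

lemma nodup_enumB (N : Nat) : (pvEnumB N).Nodup := by
  unfold pvEnumB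
  rw [List.nodup_flatMap]
  refine ⟨fun i _ => ?_, ?_⟩
  · exact (List.nodup_range).map (fun a b h => by simpa using congrArg Prod.snd h)
  · have : List.Pairwise (· < ·) (List.range N) := List.pairwise_lt_range
    refine this.imp ?_
    intro a b hab q hq1 hq2
    simp only [List.mem_map, List.mem_range] at hq1 hq2
    obtain ⟨l1, _, rfl⟩ := hq1
    obtain ⟨l2, _, h⟩ := hq2
    have := congrArg Prod.fst h
    simp at this
    omega

lemma nodup_enumA (N : Nat) : (pvEnumA N).Nodup := by
  unfold pvEnumA
  rw [List.nodup_append]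
  refine ⟨?_, List.nodup_singleton _, ?_⟩
  · rw [List.nodup_flatMap]
    refine ⟨fun k' _ => ?_, ?_⟩
    · exact (List.nodup_range).map (fun a b h => by simpa using congrArg Prod.fst h)
    · have : List.Pairwise (· < ·) (List.range (N - 1)) := List.pairwise_lt_range
      refine this.imp ?_
      intro a b hab q hq1 hq2
      simp only [List.mem_map, List.mem_range] at hq1 hq2
      obtain ⟨l1, _, rfl⟩ := hq1
      obtain ⟨l2, _, h⟩ := hq2
      have e1 := congrArg Prod.fst h
      have e2 := congrArg Prod.snd h
      simp at e1 e2
      omega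
  · intro q hq q' hq'
    simp only [List.mem_flatMap, List.mem_map, List.mem_range] at hq
    simp only [List.mem_singleton] at hq'
    obtain ⟨k', hk', j, hj, rfl⟩ := hq
    subst hq'
    intro h
    have e1 := congrArg Prod.fst h
    have e2 := congrArg Prod.snd h
    simp at e1 e2
    omega

lemma perm_enum (N : Nat) (hN : 1 ≤ N) : (pvEnumA N).Perm (pvEnumB N) := by
  rw [List.perm_ext_iff_of_nodup (nodup_enumA N) (nodup_enumB N)]
  intro p
  rw [mem_enumA N hN, mem_enumB]

lemma perm_LA_LB (x : List Int) (hx : x ≠ []) : (pvLA x).Perm (pvLB x) := by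
  exact (perm_enum x.length (by cases x <;> simp_all)).map _

lemma bf_getD (L : List Int) (v : Int) :
    (L.foldl (fun d v => d.insert v (d.getD v 0 + 1)) PySem.Dict.empty).getD v 0
      = (L.count v : Int) := by
  rw [PySem.Dict.getD_foldl_insert_add_one, PySem.Dict.getD_empty, zero_add]

lemma bf_keys (L : List Int) :
    (L.foldl (fun (d : PySem.Dict Int Int) v => d.insert v (d.getD v 0 + 1)) PySem.Dict.empty).keys
      = PySem.Set.ofList L := by
  rw [PySem.Dict.keys_foldl_insert, PySem.Dict.keys_empty, PySem.Set.ofList_eq_foldl]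
  rfl

lemma bf_nodup (L : List Int) :
    (L.foldl (fun (d : PySem.Dict Int Int) v => d.insert v (d.getD v 0 + 1)) PySem.Dict.empty).keys.Nodup :=
  PySem.Dict.nodup_keys_foldl_insert _ _ _ PySem.Dict.nodup_keys_empty

lemma computeA_sum (t : Int) (n : Int) (a : List Int) (m : Int) (b : List Int) :
    compute t n a m b = ((PySem.Set.ofList (pvLA a)).map
      (fun v => ((pvLA a).count v : Int) * ((pvLA b).count (t - v) : Int))).sum := by
  unfold compute
  dsimp only
  rw [subA_char a, subA_char b]
  set da : PySem.Dict Int Int := (pvLA a).foldl (fun d v => d.insert v (d.getD v 0 + 1)) PySem.Dict.empty with hda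
  set db : PySem.Dict Int Int := (pvLA b).foldl (fun d v => d.insert v (d.getD v 0 + 1)) PySem.Dict.empty with hdb
  have hcong : ∀ (c : Int), ∀ v ∈ da.keys,
      (fun (count v : Int) =>
        if db.contains (t - v) then count + da.getD v 0 * db.getD (t - v) 0 else count) c v
      = (fun (c v : Int) => c + ((pvLA a).count v : Int) * ((pvLA b).count (t - v) : Int)) c v := by
    intro c v _
    dsimp only
    by_cases hc : db.contains (t - v)
    · rw [if_pos hc, hda, hdb, bf_getD, bf_getD]
    · rw [if_neg hc]
      have h0 : ((pvLA b).count (t - v) : Int) = 0 := by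
        rw [← bf_getD (pvLA b) (t - v), ← hdb,
          PySem.Dict.getD_of_not_contains _ 0 (by simpa using hc)]
      rw [h0, mul_zero, add_zero]
  rw [PySem.List.foldl_congr_mem da.keys
    (fun (count v : Int) =>
      if db.contains (t - v) then count + da.getD v 0 * db.getD (t - v) 0 else count)
    (fun (c v : Int) => c + ((pvLA a).count v : Int) * ((pvLA b).count (t - v) : Int)) 0 hcong]
  rw [PySem.List.foldl_add, zero_add, hda, bf_keys]

lemma computeB_sum (t : Int) (n : Int) (a : List Int) (m : Int) (b : List Int) :
    compute_alt t n a m b = ((PySem.Set.ofList (pvLB a)).map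
      (fun v => ((pvLB a).count v : Int) * ((pvLB b).count (t - v) : Int))).sum := by
  unfold compute_alt
  dsimp only
  rw [subB_char a, subB_char b]
  set da : PySem.Dict Int Int := (pvLB a).foldl (fun d v => d.insert v (d.getD v 0 + 1)) PySem.Dict.empty with hda
  set db : PySem.Dict Int Int := (pvLB b).foldl (fun d v => d.insert v (d.getD v 0 + 1)) PySem.Dict.empty with hdb
  rw [PySem.Dict.items_eq_map_keys da (hda ▸ bf_nodup (pvLB a)) 0, List.foldl_map]
  have hcong : ∀ (c : Int), ∀ v ∈ da.keys,
      (fun (acc : Int) (v : Int) => acc + (v, da.getD v 0).2 * db.getD (t - (v, da.getD v 0).1) 0) c v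
      = (fun (c v : Int) => c + ((pvLB a).count v : Int) * ((pvLB b).count (t - v) : Int)) c v := by
    intro c v _
    dsimp only
    rw [hda, hdb, bf_getD, bf_getD]
  rw [PySem.List.foldl_congr_mem da.keys
    (fun (acc : Int) (v : Int) => acc + (v, da.getD v 0).2 * db.getD (t - (v, da.getD v 0).1) 0)
    (fun (c v : Int) => c + ((pvLB a).count v : Int) * ((pvLB b).count (t - v) : Int)) 0 hcong]
  rw [PySem.List.foldl_add, zero_add, hda, bf_keys]

lemma pvLA_nil : pvLA [] = [0] := rfl
lemma pvLB_nil : pvLB [] = [] := rfl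

lemma exSub_iff (x : List Int) (v : Int) :
    (∃ j ∈ List.range (x.length + 1), ∃ i ∈ List.range j, ((x.take j).drop i).sum = v)
      ↔ v ∈ pvLB x := by
  simp only [List.mem_range]
  rw [show (v ∈ pvLB x) ↔ ∃ p ∈ pvEnumB x.length, pvS x p.2 - pvS x p.1 = v by
    simp [pvLB, List.mem_map]]
  constructor
  · rintro ⟨j, hj, i, hi, hsum⟩
    refine ⟨(i, j), ?_, ?_⟩
    · rw [mem_enumB]
      exact ⟨hi, by omega⟩
    · rw [← hsum, List.drop_take, sum_take_drop]
      have : i + (j - i) = j := by omega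
      rw [this]
  · rintro ⟨⟨i, j⟩, hp, hsum⟩
    rw [mem_enumB] at hp
    obtain ⟨h1, h2⟩ := hp
    refine ⟨j, by omega, i, by omega, ?_⟩
    rw [List.drop_take, sum_take_drop]
    have : i + (j - i) = j := by omega
    rw [this, hsum]


-- ===== VERDICT (by name: the statement is the Claim_ definition above) =====
theorem compute_spec : Claim_unchanged_compute := by
  intro t n a m b hdom hnd
  show compute t n a m b = compute_alt t n a m b
  rw [computeA_sum, computeB_sum]
  by_cases ha : a = []
  · by_cases hb : b = []
    · subst ha hb
      have ht : t ≠ 0 := fun h => hnd ⟨Or.inl rfl, Or.inl ⟨rfl, h⟩⟩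
      rw [pvLA_nil, pvLB_nil]
      simp [List.count_singleton, PySem.Set.ofList]
      omega
    · subst ha
      have hnot : t ∉ pvLB b := by
        rw [← exSub_iff]
        intro hex
        exact hnd ⟨Or.inl rfl, Or.inr (by simpa using hex)⟩
      rw [pvLA_nil, pvLB_nil]
      have hnotA : t ∉ pvLA b := by
        rw [(perm_LA_LB b hb).mem_iff]
        exact hnot
      have hc0 : (pvLA b).count t = 0 := List.count_eq_zero.mpr hnotA
      simp [PySem.Set.ofList, hc0, PySem.Set.add]
  · by_cases hb : b = []
    · subst hb
      have hnot : t ∉ pvLB a := by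
        rw [← exSub_iff]
        intro hex
        exact hnd ⟨Or.inr rfl, Or.inr (by simpa using hex)⟩
      rw [pvLA_nil, pvLB_nil]
      have hnotA : t ∉ pvLA a := by
        rw [(perm_LA_LB a ha).mem_iff]
        exact hnot
      rw [List.sum_eq_zero, List.sum_eq_zero]
      · intro y hy
        simp only [List.mem_map] at hy
        obtain ⟨v, hv, rfl⟩ := hy
        simp
      · intro y hy
        simp only [List.mem_map] at hy
        obtain ⟨v, hv, rfl⟩ := hy
        rw [PySem.Set.mem_ofList] at hv
        have hvt : v ≠ t := fun h => hnotA (h ▸ hv)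
        have : (([0] : List Int)).count (t - v) = 0 := by
          rw [List.count_eq_zero]
          simp
          omega
        rw [this]
        simp
    · have pa := perm_LA_LB a ha
      have pb := perm_LA_LB b hb
      have hsets : (PySem.Set.ofList (pvLA a)).Perm (PySem.Set.ofList (pvLB a)) := by
        rw [List.perm_ext_iff_of_nodup (PySem.Set.nodup_ofList _) (PySem.Set.nodup_ofList _)]
        intro v
        rw [PySem.Set.mem_ofList, PySem.Set.mem_ofList, pa.mem_iff]
      have hfun : (fun v => ((pvLA a).count v : Int) * ((pvLA b).count (t - v) : Int))
          = (fun v => ((pvLB a).count v : Int) * ((pvLB b).count (t - v) : Int)) := by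
        funext v
        rw [pa.count_eq, pb.count_eq]
      rw [hfun]
      exact (hsets.map _).sum_eq

theorem compute_changed : Claim_changed_compute := by unfold Claim_changed_compute; decide

theorem compute_tight : Claim_exact_compute := by
  intro t n a m b hdom hd
  obtain ⟨hor, hcase⟩ := hd
  rcases hcase with ⟨hab, ht⟩ | hex
  · have ha : a = [] := by
      rcases hor with h | h
      · exact h
      · rw [hab, h]
    have hb : b = [] := by
      rcases hor with h | h
      · rw [← hab, h]
      · exact h
    subst ha hb ht
    rw [computeA_sum, computeB_sum, pvLA_nil, pvLB_nil]
    decide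
  · rcases hor with ha | hb
    · subst ha
      simp only [List.nil_append] at hex
      have hmemB : t ∈ pvLB b := (exSub_iff b t).mp hex
      have hb : b ≠ [] := by
        rintro rfl
        simp [pvLB_nil] at hmemB
      rw [computeA_sum, computeB_sum, pvLA_nil, pvLB_nil]
      have hmem : t ∈ pvLA b := by
        rw [(perm_LA_LB b hb).mem_iff]
        exact hmemB
      have hpos : 0 < (pvLA b).count t := List.count_pos_iff.mpr hmem
      have h1 : (PySem.Set.ofList ([0] : List Int)) = [0] := by decide
      rw [h1]
      simp only [List.map_cons, List.map_nil, List.sum_cons, List.sum_nil, List.count_singleton]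
      intro hcontra
      simp at hcontra
      omega
    · subst hb
      simp only [List.append_nil] at hex
      have hmemB : t ∈ pvLB a := (exSub_iff a t).mp hex
      have ha : a ≠ [] := by
        rintro rfl
        simp [pvLB_nil] at hmemB
      rw [computeA_sum, computeB_sum, pvLA_nil, pvLB_nil]
      have hmem : t ∈ pvLA a := by
        rw [(perm_LA_LB a ha).mem_iff]
        exact hmemB
      have hB0 : ((PySem.Set.ofList (pvLB a)).map
          (fun v => ((pvLB a).count v : Int) * (([] : List Int).count (t - v) : Int))).sum = 0 := by
        apply List.sum_eq_zero
        intro y hy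
        simp only [List.mem_map] at hy
        obtain ⟨v, _, rfl⟩ := hy
        simp
      rw [hB0]
      have htmem : t ∈ PySem.Set.ofList (pvLA a) := (PySem.Set.mem_ofList _ t).mpr hmem
      have hterm : ((pvLA a).count t : Int) * (([0] : List Int).count (t - t) : Int)
          ∈ (PySem.Set.ofList (pvLA a)).map
            (fun v => ((pvLA a).count v : Int) * (([0] : List Int).count (t - v) : Int)) :=
        List.mem_map_of_mem htmem
      have hnn : ∀ y ∈ (PySem.Set.ofList (pvLA a)).map
          (fun v => ((pvLA a).count v : Int) * (([0] : List Int).count (t - v) : Int)), 0 ≤ y := by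
        intro y hy
        simp only [List.mem_map] at hy
        obtain ⟨v, _, rfl⟩ := hy
        positivity
      have hle := List.single_le_sum hnn _ hterm
      have hp : 0 < ((pvLA a).count t : Int) * (([0] : List Int).count (t - t) : Int) := by
        have h2 : (([0] : List Int).count (t - t)) = 1 := by
          simp
        rw [h2]
        have := List.count_pos_iff.mpr hmem
        simp
        omega
      omega
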